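-- pv_equiv track=rewrite | github.com/arptra/Corewar | debug_env/debuger.py | make_str_to_list
-- ===== SOURCE A (Python) =====
-- def make_str_to_list(arena):
--     arr = []
--     i = 0
--     while i  < len(arena):
--         if arena[i] != ' ':
--             if i != (len(arena) - 1) and arena[i + 1] != ' ':
--                 byte = str(arena[i]) + str(arena[i + 1])
--                 arr.append(byte)
--                 i += 1
--             else:
--                 byte = arena[i]
--                 arr.append(byte)
--         i += 1
--     return (arr)
-- ===== SOURCE B (Python) =====
-- def make_str_to_list(arena):
--     arr = []
--     for tok in arena.split(' '):
--         for j in range(0, len(tok), 2):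
--             arr.append(tok[j:j+2])
--     return arr
-- ===== Notes on version B (the rewrite author's own statement) =====
-- stated objective: faster
-- what changed: Replaced the stateful per-character index-advancing while-loop with splitting on the space separator and slicing each token into 2-character chunks with an inner range loop.
import Mathlib
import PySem

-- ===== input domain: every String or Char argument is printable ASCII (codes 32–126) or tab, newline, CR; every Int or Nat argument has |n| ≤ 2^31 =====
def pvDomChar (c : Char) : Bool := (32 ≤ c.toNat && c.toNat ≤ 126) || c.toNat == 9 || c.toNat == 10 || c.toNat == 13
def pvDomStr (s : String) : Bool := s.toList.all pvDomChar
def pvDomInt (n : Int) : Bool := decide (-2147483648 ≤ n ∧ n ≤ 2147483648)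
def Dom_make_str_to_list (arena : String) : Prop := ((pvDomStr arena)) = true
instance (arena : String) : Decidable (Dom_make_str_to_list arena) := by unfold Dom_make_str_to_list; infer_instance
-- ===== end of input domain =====

-- B replaces A's stateful per-character while-loop by splitting on the space separator and
-- slicing each token into 2-character chunks (constant-factor speedup measured by the timing
-- run; same return value, no side effects in either).

-- ===== PORT A =====
-- the while-loop of A: index i walks the characters, pairing two adjacent non-spaces
def pvLoopA (l : List Char) (i : Nat) : List String :=
  if _h : i < l.length then
    if l.getD i ' ' ≠ ' ' then
      if i ≠ l.length - 1 ∧ l.getD (i + 1) ' ' ≠ ' ' then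
        String.mk [l.getD i ' ', l.getD (i + 1) ' '] :: pvLoopA l (i + 2)
      else
        String.mk [l.getD i ' '] :: pvLoopA l (i + 1)
    else
      pvLoopA l (i + 1)
  else []
termination_by l.length - i

def make_str_to_list (arena : String) : List String := pvLoopA arena.toList 0

-- ===== PORT B =====
def make_str_to_list_alt (arena : String) : List String :=
  (arena.toList.splitOn ' ').foldl
    (fun acc tok =>
      (PySem.List.pyRange 0 tok.length 2).foldl
        (fun acc2 j => acc2 ++ [String.mk (PySem.List.slice tok (some j) (some (j + 2)))]) acc)
    []

-- ===== PRECONDITION & SPEC =====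
def Spec_make_str_to_list (arena : String) (out : List String) : Prop := out = make_str_to_list_alt arena
instance (arena : String) (out : List String) : Decidable (Spec_make_str_to_list arena out) := by unfold Spec_make_str_to_list; infer_instance

-- ===== CLAIM (what is proved, stated in full; the proofs are below) =====
def Claim_equal_make_str_to_list : Prop := ∀ (arena : String), Dom_make_str_to_list arena → Spec_make_str_to_list arena (make_str_to_list arena)

-- ===== LEMMAS AND PROOFS =====

-- common characterisation: chunk each maximal run of non-space characters into pairs
def chunkRuns : List Char → List String
  | [] => []
  | c :: rest =>
    if c = ' ' then chunkRuns rest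
    else
      match rest with
      | [] => [String.mk [c]]
      | d :: rest' =>
        if d = ' ' then String.mk [c] :: chunkRuns rest'
        else String.mk [c, d] :: chunkRuns rest'

theorem chunkRuns_nil : chunkRuns [] = [] := by simp [chunkRuns]

theorem chunkRuns_space (r : List Char) : chunkRuns (' ' :: r) = chunkRuns r := by
  cases r <;> simp [chunkRuns]

theorem chunkRuns_single {c : Char} (hc : c ≠ ' ') : chunkRuns [c] = [String.mk [c]] := by
  simp [chunkRuns, hc]

theorem chunkRuns_cons_space {c : Char} (hc : c ≠ ' ') (r : List Char) :
    chunkRuns (c :: ' ' :: r) = String.mk [c] :: chunkRuns r := by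
  simp [chunkRuns, hc]

theorem chunkRuns_cons_cons {c d : Char} (hc : c ≠ ' ') (hd : d ≠ ' ') (r : List Char) :
    chunkRuns (c :: d :: r) = String.mk [c, d] :: chunkRuns r := by
  simp [chunkRuns, hc, hd]

-- what B's inner range-loop produces for one token
def pairsOf (t : List Char) : List String :=
  (List.range ((t.length + 1) / 2)).map (fun k => String.mk ((t.drop (2 * k)).take 2))

theorem inner_eq_pairsOf (acc : List String) (t : List Char) :
    (PySem.List.pyRange 0 t.length 2).foldl
      (fun acc2 j => acc2 ++ [String.mk (PySem.List.slice t (some j) (some (j + 2)))]) acc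
    = acc ++ pairsOf t := by
  rw [PySem.List.foldl_append_eq_flatMap, PySem.List.pyRange_of_pos 0 _ (by norm_num)]
  congr 1
  rw [List.flatMap_map, ← List.map_eq_flatMap]
  have hm : (if (0:Int) < t.length then (((t.length : Int) - 0 + 2 - 1) / 2).toNat else 0)
      = (t.length + 1) / 2 := by
    split <;> omega
  rw [hm, pairsOf]
  apply List.map_congr_left
  intro k _
  have h1 : (0 : Int) + 2 * (k : Int) = ((2 * k : Nat) : Int) := by push_cast; ring
  rw [h1]
  have h2 : ((2 * k : Nat) : Int) + 2 = ((2 * k + 2 : Nat) : Int) := by push_cast; ring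
  rw [h2, PySem.List.slice_natCast]
  simp

theorem pairsOf_nil : pairsOf [] = [] := by simp [pairsOf]

theorem pairsOf_singleton (c : Char) : pairsOf [c] = [String.mk [c]] := by
  simp [pairsOf, List.range_succ]

theorem pairsOf_cons_cons (c d : Char) (r : List Char) :
    pairsOf (c :: d :: r) = String.mk [c, d] :: pairsOf r := by
  have hl : ((c :: d :: r).length + 1) / 2 = (r.length + 1) / 2 + 1 := by
    simp; omega
  rw [pairsOf, hl, List.range_succ_eq_map, List.map_cons, List.map_map, pairsOf]
  refine congrArg₂ List.cons (by simp) ?_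
  apply List.map_congr_left
  intro k _
  have h2 : 2 * (k + 1) = 2 * k + 1 + 1 := by omega
  simp [Function.comp, h2, List.drop_succ_cons]

-- A's loop, starting at i, computes chunkRuns of the remaining suffix
theorem pvLoopA_eq_chunkRuns (l : List Char) (i : Nat) :
    pvLoopA l i = chunkRuns (l.drop i) := by
  induction i using pvLoopA.induct (l := l) with
  | case1 i h hc hg ih =>
    -- pair: i < len, l[i] ≠ ' ', i ≠ len-1 ∧ l[i+1] ≠ ' '
    have h1 : i + 1 < l.length := by omega
    have e0 : l.getD i ' ' = l[i] := List.getD_eq_getElem l ' ' h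
    have e1 : l.getD (i + 1) ' ' = l[i + 1] := List.getD_eq_getElem l ' ' h1
    rw [pvLoopA, dif_pos h, if_pos hc, if_pos hg, ih,
        List.drop_eq_getElem_cons h, List.drop_eq_getElem_cons h1,
        chunkRuns_cons_cons (e0 ▸ hc) (e1 ▸ hg.2), e0, e1]
  | case2 i h hc hg ih =>
    -- single: i < len, l[i] ≠ ' ', ¬(i ≠ len-1 ∧ l[i+1] ≠ ' ')
    have e0 : l.getD i ' ' = l[i] := List.getD_eq_getElem l ' ' h
    rw [pvLoopA, dif_pos h, if_pos hc, if_neg hg, ih]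
    by_cases hl : i = l.length - 1
    · have hd : l.drop (i + 1) = [] := List.drop_eq_nil_of_le (by omega)
      rw [hd, List.drop_eq_getElem_cons h, hd, chunkRuns_single (e0 ▸ hc),
          chunkRuns_nil, e0]
    · have h1 : i + 1 < l.length := by omega
      have e1 : l.getD (i + 1) ' ' = l[i + 1] := List.getD_eq_getElem l ' ' h1
      have hsp : l[i + 1] = ' ' := by
        rcases not_and_or.mp hg with h' | h'
        · exact absurd hl (by simpa using h')
        · rw [e1] at h'; simpa using h'
      rw [List.drop_eq_getElem_cons h, List.drop_eq_getElem_cons h1, hsp,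
          chunkRuns_cons_space (e0 ▸ hc), chunkRuns_space, e0]
  | case3 i h hc ih =>
    -- space: skip
    have e0 : l.getD i ' ' = l[i] := List.getD_eq_getElem l ' ' h
    have hsp : l[i] = ' ' := by rw [e0] at hc; simpa using hc
    rw [pvLoopA, dif_pos h, if_neg hc, ih, List.drop_eq_getElem_cons h, hsp,
        chunkRuns_space]
  | case4 i h =>
    rw [pvLoopA, dif_neg h, List.drop_eq_nil_of_le (by omega), chunkRuns_nil]

-- B's split-then-chunk computes chunkRuns
theorem flatMap_splitOn_eq_chunkRuns (l : List Char) :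
    (l.splitOn ' ').flatMap pairsOf = chunkRuns l := by
  induction l using chunkRuns.induct with
  | case1 => simp [List.splitOn, List.splitOnP_nil, pairsOf_nil, chunkRuns_nil]
  | case2 rest ih =>
    simp only [List.splitOn, List.splitOnP_cons, beq_self_eq_true, if_pos,
      List.flatMap_cons, pairsOf_nil, List.nil_append, chunkRuns_space] at *
    exact ih
  | case3 c hc =>
    simp [List.splitOn, List.splitOnP_cons, List.splitOnP_nil, hc,
          pairsOf_singleton, chunkRuns_single hc]
  | case4 c hc rest' ih =>
    simp only [List.splitOn, List.splitOnP_cons, beq_self_eq_true, if_pos,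
      beq_iff_eq, hc, if_neg, not_false_iff, List.modifyHead_cons,
      List.flatMap_cons, pairsOf_singleton, chunkRuns_cons_space hc,
      List.singleton_append] at *
    simp [ih]
  | case5 c hc d rest' hd ih =>
    obtain ⟨t, ts, hts⟩ :=
      List.exists_cons_of_ne_nil (List.splitOnP_ne_nil (fun x => x == ' ') rest')
    simp only [List.splitOn, hts, List.splitOnP_cons, beq_iff_eq, hc, hd, if_neg,
      not_false_iff, List.modifyHead_cons, List.flatMap_cons,
      chunkRuns_cons_cons hc hd] at *
    rw [pairsOf_cons_cons] at *
    simp [← ih]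

-- ===== VERDICT (by name: the statement is the Claim_ definition above) =====
theorem make_str_to_list_spec : Claim_equal_make_str_to_list := by
  intro arena _
  unfold Spec_make_str_to_list make_str_to_list make_str_to_list_alt
  simp only [inner_eq_pairsOf]
  rw [PySem.List.foldl_append_eq_flatMap, List.nil_append,
      flatMap_splitOn_eq_chunkRuns, pvLoopA_eq_chunkRuns, List.drop_zero]
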